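-- pv_equiv track=rewrite | github.com/or-m-or/KT-AIVLE-School-5th_Codingmasters | example/round2/Beginner/Q8692_묵지빠봇/A8682.py | mukchippa
-- ===== SOURCE A (Python) =====
-- def rps_winner(a, b):
--     '''
--     1 : 가위, 2 : 바위, 3 : 보
--     0 : 무승부, 1: a 승리, 2: b 승리
--     '''
--     if (a == 1 and b == 2) or (a == 2 and b == 3) or (a == 3 and b == 1):
--         return 2
--     elif a == b:
--         return 0
--     else:
--         return 1
--
-- def mukchippa(bot1: list, bot2: list) -> int:
--     idx1, idx2 = 0, 0
--     turn = 0  # 0: 선공을 정하는 단계, 1: 첫 번째 묵찌빠봇이 선공, 2: 두 번째 묵찌빠봇이 선공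
--     game_history = set()
--
--     while True:
--         state = (idx1, idx2, turn)
--         if state in game_history:
--             return 0
--         game_history.add(state)
--
--         move1 = bot1[idx1]
--         move2 = bot2[idx2]
--         idx1 = (idx1 + 1) % len(bot1)
--         idx2 = (idx2 + 1) % len(bot2)
--
--         if turn == 0:  # 선공을 정하는 단계
--             winner = rps_winner(move1, move2)
--             if winner != 0:
--                 turn = winner
--         else:
--             if turn == 1:  # 첫 번째 묵찌빠봇이 선공
--                 if move1 == move2:  # 선공 승리
--                     return 1
--                 else:
--                     winner = rps_winner(move1, move2)
--                     if winner == 2:  # 공수 교대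
--                         turn = 2
--             else:  # 두 번째 묵찌빠봇이 선공
--                 if move1 == move2:  # 선공 승리
--                     return 2
--                 else:
--                     winner = rps_winner(move1, move2)
--                     if winner == 1:  # 공수 교대
--                         turn = 1
-- ===== SOURCE B (Python) =====
-- def rps_winner(a, b):
--     if (a == 1 and b == 2) or (a == 2 and b == 3) or (a == 3 and b == 1):
--         return 2
--     if a == b:
--         return 0
--     return 1
--
-- def mukchippa(bot1: list, bot2: list) -> int:
--     # The indices advance in lockstep, so only 3*lcm(len(bot1), len(bot2))
--     # distinct (idx1, idx2, turn) states are reachable; any win happens before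
--     # a state repeats, so a bounded loop replaces the visited-set cycle
--     # detection entirely.
--     n1, n2 = len(bot1), len(bot2)
--     g, r = n1, n2
--     while r:
--         g, r = r, g % r
--     bound = 3 * (n1 * n2 // g) if g else 0  # 3 * lcm(n1, n2)
--     i1 = i2 = turn = 0
--     for _ in range(bound):
--         m1, m2 = bot1[i1], bot2[i2]
--         i1 = (i1 + 1) % n1
--         i2 = (i2 + 1) % n2
--         if turn == 0:
--             w = rps_winner(m1, m2)
--             if w != 0:
--                 turn = w
--         elif m1 == m2:
--             return turn
--         elif rps_winner(m1, m2) == 3 - turn: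
--             turn = 3 - turn
--     return 0
-- ===== Notes on version B (the rewrite author's own statement) =====
-- stated objective: simpler
-- what changed: Replaces the visited-set cycle detection with a pigeonhole bound: the lockstep indices make only 3*lcm(len(bot1),len(bot2)) (idx1,idx2,turn) states reachable, so B runs a loop bounded by that count (returning 0 = draw if no win occurs) and collapses the two symmetric turn branches into arithmetic on 3-turn.
import Mathlib
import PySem

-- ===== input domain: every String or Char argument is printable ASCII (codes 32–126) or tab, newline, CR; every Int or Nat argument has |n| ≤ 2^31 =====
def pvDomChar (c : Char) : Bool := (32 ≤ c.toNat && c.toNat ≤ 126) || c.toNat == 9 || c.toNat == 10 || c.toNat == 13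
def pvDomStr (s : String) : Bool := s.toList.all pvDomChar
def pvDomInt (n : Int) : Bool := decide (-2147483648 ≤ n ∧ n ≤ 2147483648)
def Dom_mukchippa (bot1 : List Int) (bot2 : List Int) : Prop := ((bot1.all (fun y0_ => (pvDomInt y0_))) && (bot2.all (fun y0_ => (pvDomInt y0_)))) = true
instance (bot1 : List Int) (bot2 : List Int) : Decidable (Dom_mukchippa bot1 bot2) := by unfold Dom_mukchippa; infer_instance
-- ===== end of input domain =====

-- B replaces A's visited-set cycle detection by a pigeonhole iteration bound
-- (3 * lcm(len(bot1), len(bot2)) steps, the number of reachable states) and merges the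
-- two symmetric turn branches via 3-turn; proved to return the same value on
-- nonempty bot lists (A raises IndexError on empty ones).


-- ===== PORT A =====
def rpsWinner (a b : Int) : Int :=
  if (a == 1 && b == 2) || (a == 2 && b == 3) || (a == 3 && b == 1) then 2
  else if a == b then 0
  else 1

-- A's 'while True' loop; fuel is a totality guard only (3*n1*n2+1 exceeds the
-- number of distinct (idx1, idx2, turn) states, so the 0-fuel branch is never
-- reached on inputs satisfying Pre_).
def mukchippaLoop (bot1 bot2 : List Int) (fuel : Nat) (idx1 idx2 turn : Int)
    (hist : PySem.Set (Int × Int × Int)) : Int :=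
  match fuel with
  | 0 => 0
  | fuel + 1 =>
    if PySem.Set.contains hist (idx1, idx2, turn) then 0
    else
      let hist' := PySem.Set.add hist (idx1, idx2, turn)
      match PySem.List.pyGet? bot1 idx1, PySem.List.pyGet? bot2 idx2 with
      | some move1, some move2 =>
        let idx1' := PySem.Int.mod (idx1 + 1) (bot1.length : Int)
        let idx2' := PySem.Int.mod (idx2 + 1) (bot2.length : Int)
        if turn == 0 then
          let winner := rpsWinner move1 move2
          let turn' := if winner != 0 then winner else turn
          mukchippaLoop bot1 bot2 fuel idx1' idx2' turn' hist'
        else if turn == 1 then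
          if move1 == move2 then 1
          else
            let winner := rpsWinner move1 move2
            let turn' := if winner == 2 then 2 else turn
            mukchippaLoop bot1 bot2 fuel idx1' idx2' turn' hist'
        else
          if move1 == move2 then 2
          else
            let winner := rpsWinner move1 move2
            let turn' := if winner == 1 then 1 else turn
            mukchippaLoop bot1 bot2 fuel idx1' idx2' turn' hist'
      | _, _ => 0  -- IndexError (empty bot list); excluded by Pre_mukchippa

def mukchippa (bot1 : List Int) (bot2 : List Int) : Int :=
  mukchippaLoop bot1 bot2 (3 * bot1.length * bot2.length + 1) 0 0 0 PySem.Set.empty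

-- ===== PORT B =====
def rpsWinnerB (a b : Int) : Int :=
  if (a == 1 && b == 2) || (a == 2 && b == 3) || (a == 3 && b == 1) then 2
  else if a == b then 0
  else 1

-- Source B's Euclid loop 'while r: g, r = r, g % r'
def gcdLoop (g r : Nat) : Nat :=
  if h : r = 0 then g else gcdLoop r (g % r)
termination_by r
decreasing_by exact Nat.mod_lt _ (Nat.pos_of_ne_zero h)

def mukchippaAltLoop (bot1 bot2 : List Int) (k : Nat) (i1 i2 turn : Int) : Int :=
  match k with
  | 0 => 0
  | k + 1 =>
    match PySem.List.pyGet? bot1 i1, PySem.List.pyGet? bot2 i2 with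
    | some m1, some m2 =>
      let i1' := PySem.Int.mod (i1 + 1) (bot1.length : Int)
      let i2' := PySem.Int.mod (i2 + 1) (bot2.length : Int)
      if turn == 0 then
        let w := rpsWinnerB m1 m2
        mukchippaAltLoop bot1 bot2 k i1' i2' (if w != 0 then w else turn)
      else if m1 == m2 then turn
      else if rpsWinnerB m1 m2 == 3 - turn then
        mukchippaAltLoop bot1 bot2 k i1' i2' (3 - turn)
      else
        mukchippaAltLoop bot1 bot2 k i1' i2' turn
    | _, _ => 0  -- unreachable: the loop only runs when both lists are nonempty

def mukchippa_alt (bot1 : List Int) (bot2 : List Int) : Int :=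
  let n1 := bot1.length
  let n2 := bot2.length
  let g := gcdLoop n1 n2
  let bound := if g ≠ 0 then 3 * (n1 * n2 / g) else 0  -- 3 * lcm(n1, n2)
  mukchippaAltLoop bot1 bot2 bound 0 0 0

-- ===== PRECONDITION & SPEC =====
-- Pre_ excludes exactly the inputs where A raises IndexError (an empty bot list;
-- B's bounded loop naturally returns 0 there instead).
def Pre_mukchippa (bot1 : List Int) (bot2 : List Int) : Prop := bot1 ≠ [] ∧ bot2 ≠ []
instance (bot1 : List Int) (bot2 : List Int) : Decidable (Pre_mukchippa bot1 bot2) := by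
  unfold Pre_mukchippa; infer_instance

def pvWitness_mukchippa : List Int × List Int := ([1, 2, 3], [2, 2, 1])

def Spec_mukchippa (bot1 : List Int) (bot2 : List Int) (out : Int) : Prop := out = mukchippa_alt bot1 bot2
instance (bot1 : List Int) (bot2 : List Int) (out : Int) : Decidable (Spec_mukchippa bot1 bot2 out) := by unfold Spec_mukchippa; infer_instance

-- ===== CLAIM (what is proved, stated in full; the proofs are below) =====
def Claim_equal_mukchippa : Prop := ∀ (bot1 : List Int) (bot2 : List Int), Dom_mukchippa bot1 bot2 → Pre_mukchippa bot1 bot2 → Spec_mukchippa bot1 bot2 (mukchippa bot1 bot2)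

-- ===== LEMMAS AND PROOFS =====

-- Proof-side abstractions: the shared deterministic transition system.
def mvAt (bots : List Int) (i : Int) : Int := (PySem.List.pyGet? bots i).getD 0

def isWin (bot1 bot2 : List Int) (s : Int × Int × Int) : Bool :=
  s.2.2 != 0 && (mvAt bot1 s.1 == mvAt bot2 s.2.1)

def stepState (bot1 bot2 : List Int) (s : Int × Int × Int) : Int × Int × Int :=
  let m1 := mvAt bot1 s.1
  let m2 := mvAt bot2 s.2.1
  let t := s.2.2
  let t' := if t = 0 then (if rpsWinner m1 m2 ≠ 0 then rpsWinner m1 m2 else t)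
            else if rpsWinner m1 m2 = 3 - t then 3 - t else t
  (PySem.Int.mod (s.1 + 1) (bot1.length : Int),
   PySem.Int.mod (s.2.1 + 1) (bot2.length : Int), t')

-- reachable-state shape: indices are lockstep residues of a common step counter
def stShape (n1 n2 : Nat) (x : Int × Int × Int) : Prop :=
  (∃ k : Nat, x.1 = ((k % n1 : Nat) : Int) ∧ x.2.1 = ((k % n2 : Nat) : Int)) ∧
  (x.2.2 = 0 ∨ x.2.2 = 1 ∨ x.2.2 = 2)

theorem stepState_mk (bot1 bot2 : List Int) (a b t : Int) :
    stepState bot1 bot2 (a, b, t) =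
      (PySem.Int.mod (a + 1) (bot1.length : Int), PySem.Int.mod (b + 1) (bot2.length : Int),
       if t = 0 then
         (if rpsWinner (mvAt bot1 a) (mvAt bot2 b) ≠ 0 then rpsWinner (mvAt bot1 a) (mvAt bot2 b) else t)
       else if rpsWinner (mvAt bot1 a) (mvAt bot2 b) = 3 - t then 3 - t else t) := rfl

theorem isWin_mk (bot1 bot2 : List Int) (a b t : Int) :
    isWin bot1 bot2 (a, b, t) = ((t != 0) && (mvAt bot1 a == mvAt bot2 b)) := rfl

theorem gcdLoop_eq_gcd (g r : Nat) : gcdLoop g r = Nat.gcd g r := by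
  induction r using Nat.strong_induction_on generalizing g with
  | _ r ih =>
    rw [gcdLoop]
    by_cases h : r = 0
    · simp [h]
    · simp only [h, dite_false]
      rw [ih (g % r) (Nat.mod_lt _ (Nat.pos_of_ne_zero h)) r,
          Nat.gcd_comm r (g % r), ← Nat.gcd_rec r g, Nat.gcd_comm r g]

theorem modStep (n : Nat) (hn : n ≠ 0) (c : Nat) :
    PySem.Int.mod (((c % n : Nat) : Int) + 1) (n : Int) = (((c + 1) % n : Nat) : Int) := by
  have hpos : 0 < (n : Int) := by exact_mod_cast Nat.pos_of_ne_zero hn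
  rw [PySem.Int.mod_eq_emod_of_pos hpos]
  have h1 : ((c % n : Nat) : Int) + 1 = (((c % n) + 1 : Nat) : Int) := by push_cast; ring
  rw [h1, ← Int.natCast_mod]
  congr 1
  conv_rhs => rw [Nat.add_mod]
  rw [Nat.add_mod (c % n) 1, Nat.mod_mod_of_dvd c dvd_rfl]

theorem pigeonhole_states (n1 n2 : Nat) (h1 : n1 ≠ 0) (h2 : n2 ≠ 0)
    (l : List (Int × Int × Int)) (hnd : l.Nodup)
    (hsp : ∀ x ∈ l, stShape n1 n2 x) : l.length ≤ 3 * Nat.lcm n1 n2 := by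
  set L := Nat.lcm n1 n2 with hL
  have hLpos : 0 < L :=
    Nat.lcm_pos (Nat.pos_of_ne_zero h1) (Nat.pos_of_ne_zero h2)
  have hsub : l.toFinset ⊆ (Finset.range L ×ˢ ({0, 1, 2} : Finset Int)).image
      (fun p => (((p.1 % n1 : Nat) : Int), ((p.1 % n2 : Nat) : Int), p.2)) := by
    intro x hx
    obtain ⟨⟨k, hk1, hk2⟩, ht⟩ := hsp x (List.mem_toFinset.mp hx)
    refine Finset.mem_image.mpr ⟨(k % L, x.2.2), ?_, ?_⟩
    · refine Finset.mem_product.mpr ⟨Finset.mem_range.mpr (Nat.mod_lt _ hLpos), ?_⟩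
      rcases ht with h|h|h <;> simp [h]
    · have e1 : k % L % n1 = k % n1 := Nat.mod_mod_of_dvd k (Nat.dvd_lcm_left n1 n2)
      have e2 : k % L % n2 = k % n2 := Nat.mod_mod_of_dvd k (Nat.dvd_lcm_right n1 n2)
      obtain ⟨a, b, c⟩ := x
      simp only at hk1 hk2 ⊢
      rw [e1, e2, ← hk1, ← hk2]
  have hcard := Finset.card_le_card hsub
  rw [List.toFinset_card_of_nodup hnd] at hcard
  calc l.length ≤ _ := hcard
    _ ≤ (Finset.range L ×ˢ ({0, 1, 2} : Finset Int)).card := Finset.card_image_le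
    _ = 3 * L := by rw [Finset.card_product]; simp [mul_comm]

theorem rpsWinner_cases (a b : Int) :
    rpsWinner a b = 0 ∨ rpsWinner a b = 1 ∨ rpsWinner a b = 2 := by
  unfold rpsWinner; split_ifs <;> simp

-- If s lies in a step-closed, win-free set H, B's loop from s returns 0.
theorem altLoop_cycle (bot1 bot2 : List Int) (H : List (Int × Int × Int))
    (hcl : ∀ x ∈ H, isWin bot1 bot2 x = false ∧ stepState bot1 bot2 x ∈ H) :
    ∀ (k : Nat) (s : Int × Int × Int), s ∈ H →
      mukchippaAltLoop bot1 bot2 k s.1 s.2.1 s.2.2 = 0 := by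
  intro k
  induction k with
  | zero => intro s _; simp [mukchippaAltLoop]
  | succ k ih =>
    intro s hs
    obtain ⟨hw, hstep⟩ := hcl s hs
    rw [mukchippaAltLoop]
    cases hg1 : PySem.List.pyGet? bot1 s.1 with
    | none => rfl
    | some m1 =>
      cases hg2 : PySem.List.pyGet? bot2 s.2.1 with
      | none => rfl
      | some m2 =>
        simp only []
        have hm1 : mvAt bot1 s.1 = m1 := by simp [mvAt, hg1]
        have hm2 : mvAt bot2 s.2.1 = m2 := by simp [mvAt, hg2]
        have hstep' := ih _ hstep
        simp only [stepState, hm1, hm2] at hstep'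
        by_cases ht : s.2.2 = 0
        · rw [ht] at hstep' ⊢
          have hrw : rpsWinnerB m1 m2 = rpsWinner m1 m2 := rfl
          by_cases hw0 : rpsWinner m1 m2 = 0
          · simp only [hrw, hw0] at hstep' ⊢; simpa using hstep'
          · simp [hrw, hw0] at hstep' ⊢; exact hstep'
        · have htne : (s.2.2 == 0) = false := by simp [ht]
          simp only [htne, Bool.false_eq_true]
          have hmm : (m1 == m2) = false := by
            simp [isWin, hm1, hm2, ht] at hw; simp [hw]
          simp only [hmm]
          simp only [if_neg ht] at hstep'
          by_cases hr : rpsWinner m1 m2 = 3 - s.2.2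
          · have : rpsWinnerB m1 m2 = rpsWinner m1 m2 := rfl
            simp [this, hr] at hstep' ⊢
            simpa [hr] using hstep'
          · have : rpsWinnerB m1 m2 = rpsWinner m1 m2 := rfl
            simp [this, hr] at hstep' ⊢
            exact hstep'

theorem main_invariant (bot1 bot2 : List Int) (h1 : bot1 ≠ []) (h2 : bot2 ≠ []) :
    ∀ (k f : Nat), k < f → ∀ (H : List (Int × Int × Int)) (c : Nat) (t : Int),
      (t = 0 ∨ t = 1 ∨ t = 2) →
      H.Nodup →
      (∀ x ∈ H, stShape bot1.length bot2.length x) →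
      (∀ x ∈ H, isWin bot1 bot2 x = false ∧
        (stepState bot1 bot2 x ∈ H ∨ stepState bot1 bot2 x =
          (((c % bot1.length : Nat) : Int), ((c % bot2.length : Nat) : Int), t))) →
      H.length + k = 3 * Nat.lcm bot1.length bot2.length →
      mukchippaLoop bot1 bot2 f ((c % bot1.length : Nat) : Int) ((c % bot2.length : Nat) : Int) t H =
        mukchippaAltLoop bot1 bot2 k ((c % bot1.length : Nat) : Int) ((c % bot2.length : Nat) : Int) t := by
  have hn1 : bot1.length ≠ 0 := by simpa using h1
  have hn2 : bot2.length ≠ 0 := by simpa using h2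
  intro k
  induction k with
  | zero =>
    intro f hf H c t ht hnd hsp hcl hlen
    obtain ⟨f', rfl⟩ : ∃ f', f = f' + 1 := ⟨f - 1, by omega⟩
    by_cases hmem : (((c % bot1.length : Nat) : Int), ((c % bot2.length : Nat) : Int), t) ∈ H
    · rw [mukchippaLoop, mukchippaAltLoop]
      have hc : PySem.Set.contains H
          (((c % bot1.length : Nat) : Int), ((c % bot2.length : Nat) : Int), t) = true := by
        rw [PySem.Set.contains_iff]; exact hmem
      rw [if_pos hc]
    · exfalso
      have hnd' : ((((c % bot1.length : Nat) : Int), ((c % bot2.length : Nat) : Int), t) :: H).Nodup :=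
        List.nodup_cons.mpr ⟨hmem, hnd⟩
      have hsp' : ∀ x ∈ (((c % bot1.length : Nat) : Int), ((c % bot2.length : Nat) : Int), t) :: H,
          stShape bot1.length bot2.length x := by
        intro x hx; rcases List.mem_cons.mp hx with h|h
        · exact h ▸ ⟨⟨c, rfl, rfl⟩, ht⟩
        · exact hsp x h
      have := pigeonhole_states bot1.length bot2.length hn1 hn2 _ hnd' hsp'
      simp at this; omega
  | succ k ih =>
    intro f hf H c t ht hnd hsp hcl hlen
    obtain ⟨f', rfl⟩ : ∃ f', f = f' + 1 := ⟨f - 1, by omega⟩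
    by_cases hmem : (((c % bot1.length : Nat) : Int), ((c % bot2.length : Nat) : Int), t) ∈ H
    · rw [mukchippaLoop]
      have hc : PySem.Set.contains H
          (((c % bot1.length : Nat) : Int), ((c % bot2.length : Nat) : Int), t) = true := by
        rw [PySem.Set.contains_iff]; exact hmem
      rw [if_pos hc]
      refine (altLoop_cycle bot1 bot2 H ?_ (k + 1) _ hmem).symm
      intro x hx
      obtain ⟨hw, hst⟩ := hcl x hx
      refine ⟨hw, ?_⟩
      rcases hst with h|h
      · exact h
      · exact h ▸ hmem
    · -- the state is new: both loops perform one real step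
      have hlt1 : c % bot1.length < bot1.length := Nat.mod_lt _ (Nat.pos_of_ne_zero hn1)
      have hlt2 : c % bot2.length < bot2.length := Nat.mod_lt _ (Nat.pos_of_ne_zero hn2)
      have hg1 : PySem.List.pyGet? bot1 ((c % bot1.length : Nat) : Int) =
          some (bot1[c % bot1.length]'hlt1) := by
        rw [PySem.List.pyGet?_natCast, List.getElem?_eq_getElem hlt1]
      have hg2 : PySem.List.pyGet? bot2 ((c % bot2.length : Nat) : Int) =
          some (bot2[c % bot2.length]'hlt2) := by
        rw [PySem.List.pyGet?_natCast, List.getElem?_eq_getElem hlt2]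
      set m1 := bot1[c % bot1.length]'hlt1 with hm1def
      set m2 := bot2[c % bot2.length]'hlt2 with hm2def
      have hmv1 : mvAt bot1 ((c % bot1.length : Nat) : Int) = m1 := by
        simp only [mvAt, hg1, Option.getD_some]
      have hmv2 : mvAt bot2 ((c % bot2.length : Nat) : Int) = m2 := by
        simp only [mvAt, hg2, Option.getD_some]
      have hcf : PySem.Set.contains H
          (((c % bot1.length : Nat) : Int), ((c % bot2.length : Nat) : Int), t) = false := by
        rw [Bool.eq_false_iff]
        intro h; exact hmem ((PySem.Set.contains_iff _ _).mp h)
      have hadd : PySem.Set.add H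
          (((c % bot1.length : Nat) : Int), ((c % bot2.length : Nat) : Int), t) =
          H ++ [(((c % bot1.length : Nat) : Int), ((c % bot2.length : Nat) : Int), t)] :=
        PySem.Set.add_of_not_mem hmem
      have hrec : ∀ t' : Int,
          stepState bot1 bot2 (((c % bot1.length : Nat) : Int), ((c % bot2.length : Nat) : Int), t) =
            ((((c + 1) % bot1.length : Nat) : Int), (((c + 1) % bot2.length : Nat) : Int), t') →
          (t' = 0 ∨ t' = 1 ∨ t' = 2) →
          isWin bot1 bot2 (((c % bot1.length : Nat) : Int), ((c % bot2.length : Nat) : Int), t) = false →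
          mukchippaLoop bot1 bot2 f' (((c + 1) % bot1.length : Nat) : Int)
            (((c + 1) % bot2.length : Nat) : Int) t'
            (H ++ [(((c % bot1.length : Nat) : Int), ((c % bot2.length : Nat) : Int), t)]) =
          mukchippaAltLoop bot1 bot2 k (((c + 1) % bot1.length : Nat) : Int)
            (((c + 1) % bot2.length : Nat) : Int) t' := by
        intro t' hstep ht' hwin
        refine ih f' (by omega) _ (c + 1) t' ht' ?_ ?_ ?_ (by simp; omega)
        · rw [List.nodup_append]
          refine ⟨hnd, List.nodup_singleton _, ?_⟩
          intro a ha b hb heq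
          exact hmem ((heq.trans (List.eq_of_mem_singleton hb)) ▸ ha)
        · intro x hx
          rcases List.mem_append.mp hx with h|h
          · exact hsp x h
          · simp only [List.mem_singleton] at h
            exact h ▸ ⟨⟨c, rfl, rfl⟩, ht⟩
        · intro x hx
          rcases List.mem_append.mp hx with h|h
          · obtain ⟨hw, hst⟩ := hcl x h
            refine ⟨hw, Or.inl ?_⟩
            rcases hst with hh|hh
            · exact List.mem_append_left _ hh
            · rw [hh]; exact List.mem_append_right _ (by simp)
          · simp only [List.mem_singleton] at h
            subst h
            exact ⟨hwin, Or.inr hstep⟩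
      rw [mukchippaLoop, mukchippaAltLoop, if_neg (by rw [hcf]; simp), hadd, hg1, hg2,
          modStep bot1.length hn1 c, modStep bot2.length hn2 c]
      simp only []
      rcases ht with htv|htv|htv
      · -- turn = 0
        subst htv
        norm_num
        have hwin : isWin bot1 bot2
            (((c % bot1.length : Nat) : Int), ((c % bot2.length : Nat) : Int), 0) = false := by
          rw [isWin_mk]; simp
        by_cases hw0 : rpsWinner m1 m2 = 0
        · have := hrec 0 (by
              rw [stepState_mk, modStep bot1.length hn1 c, modStep bot2.length hn2 c, hmv1, hmv2]
              simp [hw0]) (Or.inl rfl) hwin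
          simpa [hw0, show rpsWinnerB m1 m2 = rpsWinner m1 m2 from rfl] using this
        · have := hrec (rpsWinner m1 m2) (by
              rw [stepState_mk, modStep bot1.length hn1 c, modStep bot2.length hn2 c, hmv1, hmv2]
              simp [hw0]) (rpsWinner_cases m1 m2) hwin
          simpa [hw0, show rpsWinnerB m1 m2 = rpsWinner m1 m2 from rfl] using this
      · -- turn = 1
        subst htv
        norm_num
        by_cases hmm : m1 = m2
        · simp [hmm]
        · have hwin : isWin bot1 bot2
              (((c % bot1.length : Nat) : Int), ((c % bot2.length : Nat) : Int), 1) = false := by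
            rw [isWin_mk, hmv1, hmv2]
            simp [hmm]
          rw [if_neg hmm, if_neg hmm]
          by_cases hw2 : rpsWinner m1 m2 = 2
          · have := hrec 2 (by
                rw [stepState_mk, modStep bot1.length hn1 c, modStep bot2.length hn2 c, hmv1, hmv2]
                simp [hw2]) (Or.inr (Or.inr rfl)) hwin
            simpa [hw2, show rpsWinnerB m1 m2 = rpsWinner m1 m2 from rfl] using this
          · have := hrec 1 (by
                rw [stepState_mk, modStep bot1.length hn1 c, modStep bot2.length hn2 c, hmv1, hmv2]
                simp [hw2]) (Or.inr (Or.inl rfl)) hwin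
            simpa [hw2, show rpsWinnerB m1 m2 = rpsWinner m1 m2 from rfl] using this
      · -- turn = 2
        subst htv
        norm_num
        by_cases hmm : m1 = m2
        · simp [hmm]
        · have hwin : isWin bot1 bot2
              (((c % bot1.length : Nat) : Int), ((c % bot2.length : Nat) : Int), 2) = false := by
            rw [isWin_mk, hmv1, hmv2]
            simp [hmm]
          rw [if_neg hmm, if_neg hmm]
          by_cases hw1 : rpsWinner m1 m2 = 1
          · have := hrec 1 (by
                rw [stepState_mk, modStep bot1.length hn1 c, modStep bot2.length hn2 c, hmv1, hmv2]
                simp [hw1]) (Or.inr (Or.inl rfl)) hwin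
            simpa [hw1, show rpsWinnerB m1 m2 = rpsWinner m1 m2 from rfl] using this
          · have := hrec 2 (by
                rw [stepState_mk, modStep bot1.length hn1 c, modStep bot2.length hn2 c, hmv1, hmv2]
                simp [hw1]) (Or.inr (Or.inr rfl)) hwin
            simpa [hw1, show rpsWinnerB m1 m2 = rpsWinner m1 m2 from rfl] using this

-- ===== VERDICT (by name: the statement is the Claim_ definition above) =====
theorem mukchippa_spec : Claim_equal_mukchippa := by
  intro bot1 bot2 _ hpre
  obtain ⟨h1, h2⟩ := hpre
  have hn1 : bot1.length ≠ 0 := by simpa using h1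
  have hn2 : bot2.length ≠ 0 := by simpa using h2
  unfold Spec_mukchippa
  have hg : bot1.length.gcd bot2.length ≠ 0 := by
    simp [Nat.gcd_eq_zero_iff, hn1]
  have halt : mukchippa_alt bot1 bot2 =
      mukchippaAltLoop bot1 bot2 (3 * Nat.lcm bot1.length bot2.length) 0 0 0 := by
    simp only [mukchippa_alt, gcdLoop_eq_gcd, if_pos hg]
    rfl
  have hfuel : 3 * Nat.lcm bot1.length bot2.length < 3 * bot1.length * bot2.length + 1 := by
    have hdvd := Nat.lcm_dvd_mul bot1.length bot2.length
    have hle := Nat.le_of_dvd (by positivity) hdvd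
    have : 3 * bot1.length * bot2.length = 3 * (bot1.length * bot2.length) := by ring
    omega
  have := main_invariant bot1 bot2 h1 h2 (3 * Nat.lcm bot1.length bot2.length)
    (3 * bot1.length * bot2.length + 1) hfuel [] 0 0 (Or.inl rfl)
    List.nodup_nil (by simp) (by simp) (by simp)
  rw [halt]
  unfold mukchippa
  simpa using this
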